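-- pv_equiv track=rewrite | github.com/niamoto/niamoto | src/niamoto/gui/api/services/templates/utils/entity_finder.py | _detect_geometry_column
-- ===== SOURCE A (Python) =====
-- from typing import Any, Dict, List, Optional
--
-- def _detect_geometry_column(columns: List[str]) -> Optional[str]:
--     """Detect a likely geometry column name."""
--     lowered = [c.lower() for c in columns]
--     preferred = [
--         "wkb_geometry",
--         "geometry",
--         "the_geom",
--         "geom",
--         "geo_pt",
--         "location",
--         "wkt",
--     ]
--     for candidate in preferred:
--         if candidate in lowered:
--             return columns[lowered.index(candidate)]
--     return None
-- ===== SOURCE B (Python) =====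
-- from typing import List, Optional
--
-- def _detect_geometry_column(columns: List[str]) -> Optional[str]:
--     """Detect a likely geometry column name (single pass with a priority table)."""
--     rank = {
--         "wkb_geometry": 0,
--         "geometry": 1,
--         "the_geom": 2,
--         "geom": 3,
--         "geo_pt": 4,
--         "location": 5,
--         "wkt": 6,
--     }
--     best = None  # (rank, column) of the best candidate seen so far
--     for col in columns:
--         r = rank.get(col.lower())
--         if r is not None and (best is None or r < best[0]):
--             best = (r, col)
--     return best[1] if best is not None else None
-- ===== Notes on version B (the rewrite author's own statement) =====
-- stated objective: faster
-- what changed: Replaces the candidate-outer nested scan (a membership test plus a .index scan over the lowered columns per candidate) by one pass over the columns that looks each lowercased column up in a fixed priority table and keeps the strictly best-ranked first match (constant-factor: one traversal and one lowercase per column instead of up to 14 list scans).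
import Mathlib
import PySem

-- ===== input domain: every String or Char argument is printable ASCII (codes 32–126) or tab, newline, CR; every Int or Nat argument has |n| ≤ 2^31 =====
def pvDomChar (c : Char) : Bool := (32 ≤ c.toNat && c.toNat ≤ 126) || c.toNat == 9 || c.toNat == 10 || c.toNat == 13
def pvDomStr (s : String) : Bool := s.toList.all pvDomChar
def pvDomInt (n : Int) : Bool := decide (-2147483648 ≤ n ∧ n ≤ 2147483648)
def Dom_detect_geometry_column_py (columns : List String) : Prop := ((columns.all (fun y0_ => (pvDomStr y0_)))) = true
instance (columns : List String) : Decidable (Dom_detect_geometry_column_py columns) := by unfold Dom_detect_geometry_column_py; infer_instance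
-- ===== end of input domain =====

-- B replaces A's candidate-outer nested scans (membership test + .index per candidate) by a
-- single pass over the columns with a fixed priority table (objective: faster, measured constant-factor).

-- ===== PORT A =====
def pvPreferredA : List String :=
  ["wkb_geometry", "geometry", "the_geom", "geom", "geo_pt", "location", "wkt"]

-- the 'for candidate in preferred' loop of A
def pvFindA (columns lowered : List String) : List String → Option String
  | [] => none
  | c :: rest =>
    if lowered.contains c then
      match PySem.List.index? lowered c with
      | some i => PySem.List.pyGet? columns ((i : Nat) : Int)
      | none => none   -- unreachable: the candidate was just found in lowered
    else pvFindA columns lowered rest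

def detect_geometry_column_py (columns : List String) : Option String :=
  pvFindA columns (columns.map PySem.Str.lower) pvPreferredA

-- ===== PORT B =====
-- the dict literal 'rank = {...}' of B, built key by key in order
def pvRankB : PySem.Dict String Int :=
  ((((((PySem.Dict.empty.insert "wkb_geometry" 0).insert "geometry" 1).insert
      "the_geom" 2).insert "geom" 3).insert "geo_pt" 4).insert "location" 5).insert "wkt" 6

-- one iteration of B's 'for col in columns' loop
def pvStepB (best : Option (Int × String)) (col : String) : Option (Int × String) :=
  match pvRankB.get? (PySem.Str.lower col) with
  | none => best
  | some r =>
    match best with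
    | none => some (r, col)
    | some (br, _) => if r < br then some (r, col) else best

def detect_geometry_column_py_alt (columns : List String) : Option String :=
  match columns.foldl pvStepB none with
  | some (_, c) => some c
  | none => none

-- ===== PRECONDITION & SPEC =====
def Spec_detect_geometry_column_py (columns : List String) (out : Option String) : Prop := out = detect_geometry_column_py_alt columns
instance (columns : List String) (out : Option String) : Decidable (Spec_detect_geometry_column_py columns out) := by unfold Spec_detect_geometry_column_py; infer_instance

-- ===== CLAIM (what is proved, stated in full; the proofs are below) =====
def Claim_equal_detect_geometry_column_py : Prop := ∀ (columns : List String), Dom_detect_geometry_column_py columns → Spec_detect_geometry_column_py columns (detect_geometry_column_py columns)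

-- ===== LEMMAS AND PROOFS =====

-- rank of a column relative to a candidate list (Nat-valued reference version)
def pvRkN (cs : List String) (col : String) : Option Nat :=
  PySem.List.index? cs (PySem.Str.lower col)

def pvStepN (cs : List String) (best : Option (Nat × String)) (col : String) :
    Option (Nat × String) :=
  match pvRkN cs col with
  | none => best
  | some r =>
    match best with
    | none => some (r, col)
    | some (br, _) => if r < br then some (r, col) else best

lemma pvFold_nil (columns : List String) (acc : Option (Nat × String)) :
    columns.foldl (pvStepN []) acc = acc := by
  induction columns generalizing acc with
  | nil => rfl
  | cons c t ih =>
      have h : pvStepN [] acc c = acc := by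
        unfold pvStepN pvRkN
        simp [PySem.List.index?_eq_idxOf?]
      rw [List.foldl_cons, h, ih]

lemma pvFold_keep (cs : List String) (suf : List String) (y : String) :
    suf.foldl (pvStepN cs) (some (0, y)) = some (0, y) := by
  induction suf with
  | nil => rfl
  | cons c t ih =>
      have h : pvStepN cs (some (0, y)) c = some (0, y) := by
        unfold pvStepN
        cases hr : pvRkN cs c <;> simp
      rw [List.foldl_cons, h, ih]

lemma pvFold_firstZero (cs : List String) (x : String) (suf : List String)
    (hx : pvRkN cs x = some 0) :
    ∀ (pre : List String), (∀ y ∈ pre, pvRkN cs y ≠ some 0) →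
      ∀ (acc : Option (Nat × String)),
        (acc = none ∨ ∃ r y, acc = some (r, y) ∧ r ≠ 0) →
        (pre ++ x :: suf).foldl (pvStepN cs) acc = some (0, x) := by
  intro pre
  induction pre with
  | nil =>
      intro _ acc hacc
      have hstep : pvStepN cs acc x = some (0, x) := by
        unfold pvStepN
        rw [hx]
        rcases hacc with rfl | ⟨r, y, rfl, hr⟩
        · rfl
        · simp [Nat.pos_of_ne_zero hr]
      simp only [List.nil_append, List.foldl_cons]
      rw [hstep, pvFold_keep]
  | cons p ps ih =>
      intro hpre acc hacc
      simp only [List.cons_append, List.foldl_cons]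
      refine ih (fun y hy => hpre y (List.mem_cons_of_mem _ hy)) _ ?_
      have hp : pvRkN cs p ≠ some 0 := hpre p List.mem_cons_self
      unfold pvStepN
      cases hr : pvRkN cs p with
      | none => exact hacc
      | some r =>
          have hrne : r ≠ 0 := fun h => hp (by rw [hr, h])
          rcases hacc with rfl | ⟨br, y, rfl, hbr⟩
          · exact Or.inr ⟨r, p, rfl, hrne⟩
          · dsimp only
            split_ifs
            · exact Or.inr ⟨r, p, rfl, hrne⟩
            · exact Or.inr ⟨br, y, rfl, hbr⟩

lemma pvFold_shift (c : String) (cs : List String) :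
    ∀ (columns : List String), (∀ col ∈ columns, c ≠ PySem.Str.lower col) →
      ∀ (acc : Option (Nat × String)),
        columns.foldl (pvStepN (c :: cs)) (acc.map (fun p => (p.1 + 1, p.2))) =
          (columns.foldl (pvStepN cs) acc).map (fun p => (p.1 + 1, p.2)) := by
  intro columns
  induction columns with
  | nil => intro _ acc; rfl
  | cons col t ih =>
      intro hne acc
      have hstep : pvStepN (c :: cs) (acc.map (fun p => (p.1 + 1, p.2))) col =
          (pvStepN cs acc col).map (fun p => (p.1 + 1, p.2)) := by
        unfold pvStepN pvRkN
        rw [PySem.List.index?_cons_of_ne _ (hne col List.mem_cons_self)]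
        cases hr : PySem.List.index? cs (PySem.Str.lower col) with
        | none => rfl
        | some r =>
            rcases acc with _ | ⟨br, y⟩
            · rfl
            · simp only [Option.map_some]
              by_cases hlt : r < br
              · rw [if_pos hlt, if_pos (by omega : r + 1 < br + 1)]; rfl
              · rw [if_neg hlt, if_neg (by omega : ¬ r + 1 < br + 1)]; rfl
      simp only [List.foldl_cons]
      rw [hstep, ih (fun z hz => hne z (List.mem_cons_of_mem _ hz))]

lemma pvA_char (cs : List String) (columns : List String) :
    pvFindA columns (columns.map PySem.Str.lower) cs =
      (columns.foldl (pvStepN cs) none).map (·.2) := by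
  induction cs with
  | nil => rw [pvFold_nil]; rfl
  | cons c rest ih =>
      by_cases hc : (columns.map PySem.Str.lower).contains c
      · have hmem : c ∈ columns.map PySem.Str.lower := by simpa using hc
        obtain ⟨i, hi⟩ :
            ∃ i, PySem.List.index? (columns.map PySem.Str.lower) c = some i :=
          Option.isSome_iff_exists.mp ((PySem.List.index?_isSome_iff _ c).2 hmem)
        obtain ⟨hk, hxe, hprev⟩ := PySem.List.getElem_of_index?_eq_some hi
        have hilen : i < columns.length := by simpa using hk
        -- left side: A returns columns[i]
        have hL : pvFindA columns (columns.map PySem.Str.lower) (c :: rest) =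
            some columns[i] := by
          simp only [pvFindA]
          rw [if_pos hc, hi]
          show PySem.List.pyGet? columns ((i : Nat) : Int) = some columns[i]
          rw [PySem.List.pyGet?_natCast]
          exact List.getElem?_eq_getElem hilen
        -- right side via decomposition at index i
        have hdec : columns = columns.take i ++ columns[i] :: columns.drop (i + 1) := by
          conv_lhs => rw [← List.take_append_drop i columns]
          rw [List.drop_eq_getElem_cons hilen]
        have hx : pvRkN (c :: rest) columns[i] = some 0 := by
          have : PySem.Str.lower columns[i] = c := by
            have := hxe
            rwa [List.getElem_map] at this
          unfold pvRkN
          rw [this, PySem.List.index?_cons_self]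
        have hpre : ∀ y ∈ columns.take i, pvRkN (c :: rest) y ≠ some 0 := by
          intro y hy
          obtain ⟨j, hj, hje⟩ := List.mem_take_iff_getElem.mp hy
          have hji : j < i := lt_of_lt_of_le hj (min_le_left _ _)
          have hne : c ≠ PySem.Str.lower y := by
            have := hprev j (by simpa using hji)
            rw [List.getElem_map] at this
            rw [← hje]
            exact fun h => this h.symm
          unfold pvRkN
          rw [PySem.List.index?_cons_of_ne _ hne]
          cases PySem.List.index? rest (PySem.Str.lower y) <;> simp
        rw [hL]
        conv_rhs => rw [hdec]
        rw [pvFold_firstZero (c :: rest) columns[i] (columns.drop (i + 1)) hx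
          (columns.take i) hpre none (Or.inl rfl)]
        rfl
      · have hnc : ∀ col ∈ columns, c ≠ PySem.Str.lower col := by
          intro col hcol h
          exact hc (by simp only [List.contains_iff_mem]; exact h ▸ List.mem_map_of_mem hcol)
        have hL : pvFindA columns (columns.map PySem.Str.lower) (c :: rest) =
            pvFindA columns (columns.map PySem.Str.lower) rest := by
          simp only [pvFindA]; rw [if_neg hc]
        rw [hL, ih]
        have := pvFold_shift c rest columns hnc none
        simp only [Option.map_none] at this
        rw [this]
        cases columns.foldl (pvStepN rest) none with
        | none => rfl
        | some p => rfl

lemma pvRank_get (s : String) :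
    pvRankB.get? s = (PySem.List.index? pvPreferredA s).map (fun n => ((n : Nat) : Int)) := by
  by_cases h1 : s = "wkb_geometry"
  · subst h1; decide
  by_cases h2 : s = "geometry"
  · subst h2; decide
  by_cases h3 : s = "the_geom"
  · subst h3; decide
  by_cases h4 : s = "geom"
  · subst h4; decide
  by_cases h5 : s = "geo_pt"
  · subst h5; decide
  by_cases h6 : s = "location"
  · subst h6; decide
  by_cases h7 : s = "wkt"
  · subst h7; decide
  have hidx : PySem.List.index? pvPreferredA s = none := by
    rw [PySem.List.index?_eq_none_iff]
    simp [pvPreferredA, h1, h2, h3, h4, h5, h6, h7]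
  have hget : pvRankB.get? s = none := by
    simp [pvRankB, PySem.Dict.get?_insert, PySem.Dict.get?_empty, h1, h2, h3, h4, h5, h6, h7]
  rw [hidx, hget]; rfl

lemma pvB_sim : ∀ (columns : List String) (acc : Option (Nat × String)),
    columns.foldl pvStepB (acc.map (fun p => ((p.1 : Int), p.2))) =
      (columns.foldl (pvStepN pvPreferredA) acc).map (fun p => ((p.1 : Int), p.2)) := by
  intro columns
  induction columns with
  | nil => intro acc; rfl
  | cons col t ih =>
      intro acc
      have hstep : pvStepB (acc.map (fun p => ((p.1 : Int), p.2))) col =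
          (pvStepN pvPreferredA acc col).map (fun p => ((p.1 : Int), p.2)) := by
        unfold pvStepB pvStepN pvRkN
        rw [pvRank_get]
        cases hr : PySem.List.index? pvPreferredA (PySem.Str.lower col) with
        | none => rfl
        | some r =>
            rcases acc with _ | ⟨br, y⟩
            · rfl
            · simp only [Option.map_some]
              by_cases hlt : r < br
              · rw [if_pos hlt, if_pos (show (r:Int) < (br:Int) by exact_mod_cast hlt)]; rfl
              · rw [if_neg hlt, if_neg (show ¬ (r:Int) < (br:Int) by exact_mod_cast hlt)]; rfl
      simp only [List.foldl_cons]
      rw [hstep, ih]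

-- ===== VERDICT (by name: the statement is the Claim_ definition above) =====
theorem detect_geometry_column_py_spec : Claim_equal_detect_geometry_column_py := by
  intro columns _
  unfold Spec_detect_geometry_column_py detect_geometry_column_py detect_geometry_column_py_alt
  rw [pvA_char pvPreferredA columns]
  have := pvB_sim columns none
  simp only [Option.map_none] at this
  rw [this]
  cases columns.foldl (pvStepN pvPreferredA) none with
  | none => rfl
  | some p => rfl
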